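-- pv_equiv track=rewrite | github.com/shamo0/headerchecker | headerchecker.py | check_cookie_security
-- ===== SOURCE A (Python) =====
-- def check_cookie_security(headers):
--     cookies = headers.get("set-cookie", "")
--     missing_flags = []
--     for cookie in cookies.split(","):
--         lower = cookie.lower()
--         if "secure" not in lower:
--             missing_flags.append("Secure")
--         if "httponly" not in lower:
--             missing_flags.append("HttpOnly")
--         if "samesite" not in lower:
--             missing_flags.append("SameSite")
--     if missing_flags:
--         return 0, f"Set-Cookie missing flags: {', '.join(sorted(set(missing_flags)))}"
--     return 5, None
-- ===== SOURCE B (Python) =====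
-- def check_cookie_security(headers):
--     cookies = headers.get("set-cookie", "").split(",")
--     missing = [name for name, key in (("HttpOnly", "httponly"),
--                                       ("SameSite", "samesite"),
--                                       ("Secure", "secure"))
--                if any(key not in c.lower() for c in cookies)]
--     if missing:
--         return 0, "Set-Cookie missing flags: " + ", ".join(missing)
--     return 5, None
-- ===== Notes on version B (the rewrite author's own statement) =====
-- stated objective: simpler
-- what changed: B transposes the loops: instead of appending per-cookie flag names and deduplicating with sorted(set(...)), it iterates over the three (name, key) pairs already in sorted order and includes a name when any cookie lacks the key, so the dedup-and-sort step disappears.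
import Mathlib
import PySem

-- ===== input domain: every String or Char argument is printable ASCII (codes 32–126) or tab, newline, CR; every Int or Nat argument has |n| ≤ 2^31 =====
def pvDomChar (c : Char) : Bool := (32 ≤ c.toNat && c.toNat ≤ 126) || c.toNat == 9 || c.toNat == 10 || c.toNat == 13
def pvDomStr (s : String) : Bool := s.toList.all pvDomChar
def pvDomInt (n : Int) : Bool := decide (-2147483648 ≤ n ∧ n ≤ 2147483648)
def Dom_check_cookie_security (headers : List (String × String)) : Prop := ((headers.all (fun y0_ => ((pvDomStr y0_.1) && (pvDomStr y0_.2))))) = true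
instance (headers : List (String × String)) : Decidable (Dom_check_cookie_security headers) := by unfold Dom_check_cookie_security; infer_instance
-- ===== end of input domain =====

-- B is simpler: one any() scan per flag, pairs listed already in sorted order, so the
-- per-cookie appends and the sorted(set(...)) dedup disappear. Equivalence of return values.

-- ===== PORT A =====
def check_cookie_security (headers : List (String × String)) : Int × Option String :=
  let cookies := (PySem.Dict.mk headers).getD "set-cookie" ""
  let missing_flags :=
    -- sep "," is nonempty: split? is some
    ((PySem.Str.split? cookies ",").getD []).foldl (fun acc cookie =>
      let lower := PySem.Str.lower cookie
      let acc := if PySem.Str.isIn "secure" lower then acc else acc ++ ["Secure"]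
      let acc := if PySem.Str.isIn "httponly" lower then acc else acc ++ ["HttpOnly"]
      if PySem.Str.isIn "samesite" lower then acc else acc ++ ["SameSite"]) []
  if missing_flags ≠ [] then
    (0, some ("Set-Cookie missing flags: " ++
      PySem.Str.join ", " (PySem.List.sorted (PySem.Set.ofList missing_flags) (fun x => x) false)))
  else (5, none)

-- ===== PORT B =====
def check_cookie_security_alt (headers : List (String × String)) : Int × Option String :=
  let cookies : List String := (PySem.Str.split? ((PySem.Dict.mk headers).getD "set-cookie" "") ",").getD []  -- nonempty sep
  let missing :=
    [("HttpOnly", "httponly"), ("SameSite", "samesite"), ("Secure", "secure")].filterMap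
      (fun p => if cookies.any (fun c => !(PySem.Str.isIn p.2 (PySem.Str.lower c))) then some p.1 else none)
  if missing ≠ [] then
    (0, some ("Set-Cookie missing flags: " ++ PySem.Str.join ", " missing))
  else (5, none)

-- ===== PRECONDITION & SPEC =====
def Spec_check_cookie_security (headers : List (String × String)) (out : Int × Option String) : Prop := out = check_cookie_security_alt headers
instance (headers : List (String × String)) (out : Int × Option String) : Decidable (Spec_check_cookie_security headers out) := by unfold Spec_check_cookie_security; infer_instance

-- ===== CLAIM (what is proved, stated in full; the proofs are below) =====
def Claim_equal_check_cookie_security : Prop := ∀ (headers : List (String × String)), Dom_check_cookie_security headers → Spec_check_cookie_security headers (check_cookie_security headers)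

-- ===== LEMMAS AND PROOFS =====

-- the flags cookie c contributes in A's inner loop, in A's append order
def pvMiss (c : String) : List String :=
  (if PySem.Str.isIn "secure" (PySem.Str.lower c) then [] else ["Secure"]) ++
  (if PySem.Str.isIn "httponly" (PySem.Str.lower c) then [] else ["HttpOnly"]) ++
  (if PySem.Str.isIn "samesite" (PySem.Str.lower c) then [] else ["SameSite"])

-- B's missing list: one entry per flag, already in sorted order
def pvCanon (cs : List String) : List String :=
  (if cs.any (fun c => !(PySem.Str.isIn "httponly" (PySem.Str.lower c))) then ["HttpOnly"] else []) ++
  (if cs.any (fun c => !(PySem.Str.isIn "samesite" (PySem.Str.lower c))) then ["SameSite"] else []) ++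
  (if cs.any (fun c => !(PySem.Str.isIn "secure" (PySem.Str.lower c))) then ["Secure"] else [])

lemma pv_foldlA (cs acc : List String) :
    cs.foldl (fun acc cookie =>
      let lower := PySem.Str.lower cookie
      let acc := if PySem.Str.isIn "secure" lower then acc else acc ++ ["Secure"]
      let acc := if PySem.Str.isIn "httponly" lower then acc else acc ++ ["HttpOnly"]
      if PySem.Str.isIn "samesite" lower then acc else acc ++ ["SameSite"]) acc
    = acc ++ cs.flatMap pvMiss := by
  induction cs generalizing acc with
  | nil => simp
  | cons c cs ih => simp only [List.foldl_cons, ih, List.flatMap_cons, pvMiss]; split_ifs <;> simp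

lemma pv_memChar (cs : List String) (x : String) :
    x ∈ cs.flatMap pvMiss ↔ x ∈ pvCanon cs := by
  simp only [pvMiss, pvCanon, List.mem_flatMap, List.mem_append, List.mem_ite_nil_left,
    List.mem_ite_nil_right, List.mem_singleton, List.any_eq_true, Bool.not_eq_true',
    Bool.not_eq_true]
  constructor
  · rintro ⟨c, hc, ((⟨h, rfl⟩ | ⟨h, rfl⟩) | ⟨h, rfl⟩)⟩
    · exact Or.inr ⟨⟨c, hc, h⟩, rfl⟩
    · exact Or.inl (Or.inl ⟨⟨c, hc, h⟩, rfl⟩)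
    · exact Or.inl (Or.inr ⟨⟨c, hc, h⟩, rfl⟩)
  · rintro ((⟨⟨c, hc, h⟩, rfl⟩ | ⟨⟨c, hc, h⟩, rfl⟩) | ⟨⟨c, hc, h⟩, rfl⟩)
    · exact ⟨c, hc, Or.inl (Or.inr ⟨h, rfl⟩)⟩
    · exact ⟨c, hc, Or.inr ⟨h, rfl⟩⟩
    · exact ⟨c, hc, Or.inl (Or.inl ⟨h, rfl⟩)⟩

lemma pv_canon_nodup (cs : List String) : (pvCanon cs).Nodup := by
  unfold pvCanon; split_ifs <;> decide

lemma pv_canon_pairwise (cs : List String) :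
    (pvCanon cs).Pairwise (fun a b => a ≤ b) := by
  unfold pvCanon; split_ifs <;> simp [List.pairwise_cons, String.le_iff_toList_le] <;> decide

lemma pv_sortedEq (cs : List String) :
    PySem.List.sorted (PySem.Set.ofList (cs.flatMap pvMiss)) (fun x => x) false = pvCanon cs := by
  apply PySem.List.sorted_id_eq_of_perm_of_pairwise
  · rw [List.perm_ext_iff_of_nodup (pv_canon_nodup cs) (PySem.Set.nodup_ofList _)]
    intro a; rw [PySem.Set.mem_ofList]; exact (pv_memChar cs a).symm
  · exact pv_canon_pairwise cs

lemma pv_nilIff (cs : List String) : cs.flatMap pvMiss = [] ↔ pvCanon cs = [] := by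
  simp only [List.eq_nil_iff_forall_not_mem]
  constructor <;> intro h x <;> have := h x
  · rwa [pv_memChar cs x] at this
  · rwa [← pv_memChar cs x] at this

lemma pv_altMissing (cs : List String) :
    [("HttpOnly", "httponly"), ("SameSite", "samesite"), ("Secure", "secure")].filterMap
      (fun p => if cs.any (fun c => !(PySem.Str.isIn p.2 (PySem.Str.lower c))) then some p.1 else none)
    = pvCanon cs := by
  unfold pvCanon
  split_ifs with h1 h2 h3 h4 h5 h6 h7 <;> simp_all

-- ===== VERDICT (by name: the statement is the Claim_ definition above) =====
theorem check_cookie_security_spec : Claim_equal_check_cookie_security := by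
  intro headers _
  unfold Spec_check_cookie_security
  simp only [check_cookie_security, check_cookie_security_alt]
  rw [pv_foldlA, pv_altMissing]
  simp only [List.nil_append]
  rw [pv_sortedEq]
  by_cases h : pvCanon ((PySem.Str.split? ((PySem.Dict.mk headers).getD "set-cookie" "") ",").getD []) = []
  · rw [if_neg (fun hne => hne ((pv_nilIff _).mpr h)), if_neg (fun hne => hne h)]
  · rw [if_pos (fun he => h ((pv_nilIff _).mp he)), if_pos h]
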